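-- pv_equiv track=rewrite | github.com/u9401066/med-paper-assistant | scripts/migrate_mcp_json.py | _strip_jsonc_comments
-- ===== SOURCE A (Python) =====
-- def _strip_jsonc_comments(raw: str) -> str:
--     """Remove ``//`` comments while preserving content inside JSON strings."""
--     lines: list[str] = []
--     for line in raw.splitlines():
--         in_string = False
--         escaped = False
--         chars: list[str] = []
--         idx = 0
--         while idx < len(line):
--             ch = line[idx]
--             if escaped:
--                 chars.append(ch)
--                 escaped = False
--                 idx += 1
--                 continue
--             if ch == "\\":
--                 chars.append(ch)
--                 escaped = True
--                 idx += 1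
--                 continue
--             if ch == '"':
--                 in_string = not in_string
--                 chars.append(ch)
--                 idx += 1
--                 continue
--             if not in_string and ch == "/" and idx + 1 < len(line) and line[idx + 1] == "/":
--                 break
--             chars.append(ch)
--             idx += 1
--         lines.append("".join(chars))
--     return "\n".join(lines)
-- ===== SOURCE B (Python) =====
-- def _strip_jsonc_comments(raw: str) -> str:
--     """Remove ``//`` comments while preserving content inside JSON strings."""
--     return "\n".join(_strip_line(line) for line in raw.splitlines())
--
--
-- def _strip_line(line: str) -> str:
--     # Token scanner: consume whole string literals (and backslash escapes)
--     # as chunks; cut the line at the first '//' found between tokens.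
--     out = []
--     i = 0
--     n = len(line)
--     while i < n:
--         ch = line[i]
--         if ch == '"':
--             # consume the entire string literal, honouring escapes;
--             # an unterminated string runs to the end of the line
--             j = i + 1
--             while j < n:
--                 if line[j] == "\\":
--                     j += 2
--                 elif line[j] == '"':
--                     j += 1
--                     break
--                 else:
--                     j += 1
--             out.append(line[i:j])
--             i = j
--         elif ch == "\\":
--             # escape outside a string: keep the pair verbatim
--             out.append(line[i:i + 2])
--             i += 2
--         elif ch == "/" and line.startswith("//", i):
--             break
--         else:
--             out.append(ch)
--             i += 1
--     return "".join(out)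
-- ===== Notes on version B (the rewrite author's own statement) =====
-- stated objective: alternative
-- what changed: Replaces A's per-character in_string/escaped boolean state machine with a token scanner that consumes whole string literals and backslash-escape pairs as chunks and cuts the line at the first comment marker (two slashes) found between tokens.
import Mathlib
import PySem

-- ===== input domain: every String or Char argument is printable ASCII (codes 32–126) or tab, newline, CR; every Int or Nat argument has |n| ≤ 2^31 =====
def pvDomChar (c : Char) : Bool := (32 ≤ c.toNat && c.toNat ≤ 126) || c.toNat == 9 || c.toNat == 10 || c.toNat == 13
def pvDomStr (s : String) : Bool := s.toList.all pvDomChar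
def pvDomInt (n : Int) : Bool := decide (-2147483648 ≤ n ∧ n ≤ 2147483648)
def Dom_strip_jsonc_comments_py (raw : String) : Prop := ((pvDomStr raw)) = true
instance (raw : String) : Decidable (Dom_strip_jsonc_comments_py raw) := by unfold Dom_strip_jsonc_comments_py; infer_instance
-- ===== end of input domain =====

-- B replaces A's per-character in_string/escaped state machine by a token scanner that
-- consumes whole string literals and escape pairs as chunks (objective: alternative).

-- ===== PORT A =====
-- the while-loop of A: recursion over the remaining suffix of the line,
-- carrying the in_string / escaped flags; rest.head? is line[idx+1]
def stripLineA : List Char → Bool → Bool → List Char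
  | [], _, _ => []
  | c :: rest, inStr, esc =>
    if esc then c :: stripLineA rest inStr false
    else if c == '\\' then c :: stripLineA rest inStr true
    else if c == '"' then c :: stripLineA rest (!inStr) false
    else if !inStr && c == '/' && rest.head? == some '/' then []
    else c :: stripLineA rest inStr false

def strip_jsonc_comments_py (raw : String) : String :=
  String.mk (PySem.Chars.join ['\n']
    ((PySem.Chars.splitlines raw.toList).map (fun l => stripLineA l false false)))

-- ===== PORT B =====
-- consume a string literal after its opening quote (Source B's inner j-loop):
-- returns the consumed chunk and the remaining suffix
def consumeStr : List Char → List Char × List Char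
  | [] => ([], [])
  | c :: rest =>
    if c == '\\' then
      match rest with
      | [] => ([c], [])
      | d :: rest' => let (t, r) := consumeStr rest'; (c :: d :: t, r)
    else if c == '"' then ([c], rest)
    else let (t, r) := consumeStr rest; (c :: t, r)

-- termination of the outer loop: the inner loop never lengthens the rest
theorem consumeStr_rest_le (cs : List Char) : (consumeStr cs).2.length ≤ cs.length := by
  fun_induction consumeStr cs <;> simp_all <;> omega

-- Source B's outer token loop over one line
def stripLineB : List Char → List Char
  | [] => []
  | c :: rest =>
    if c == '"' then
      (c :: (consumeStr rest).1) ++ stripLineB (consumeStr rest).2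
    else if c == '\\' then
      match rest with
      | [] => [c]
      | d :: rest' => c :: d :: stripLineB rest'
    else if c == '/' && rest.head? == some '/' then []
    else c :: stripLineB rest
termination_by cs => cs.length
decreasing_by
  · simpa using Nat.lt_succ_of_le (consumeStr_rest_le rest)
  · simp
  · simp

def strip_jsonc_comments_py_alt (raw : String) : String :=
  String.mk (PySem.Chars.join ['\n']
    ((PySem.Chars.splitlines raw.toList).map stripLineB))

-- ===== PRECONDITION & SPEC =====
def Spec_strip_jsonc_comments_py (raw : String) (out : String) : Prop := out = strip_jsonc_comments_py_alt raw
instance (raw : String) (out : String) : Decidable (Spec_strip_jsonc_comments_py raw out) := by unfold Spec_strip_jsonc_comments_py; infer_instance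

-- ===== CLAIM (what is proved, stated in full; the proofs are below) =====
def Claim_equal_strip_jsonc_comments_py : Prop := ∀ (raw : String), Dom_strip_jsonc_comments_py raw → Spec_strip_jsonc_comments_py raw (strip_jsonc_comments_py raw)

-- ===== LEMMAS AND PROOFS =====

theorem consumeStr_append (cs : List Char) :
    stripLineA cs true false = (consumeStr cs).1 ++ stripLineA (consumeStr cs).2 false false := by
  fun_induction consumeStr cs <;> simp_all [stripLineA]

theorem stripLineB_eq (cs : List Char) : stripLineB cs = stripLineA cs false false := by
  fun_induction stripLineB cs <;> simp_all [stripLineA, consumeStr_append]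

-- ===== VERDICT (by name: the statement is the Claim_ definition above) =====
theorem strip_jsonc_comments_py_spec : Claim_equal_strip_jsonc_comments_py := by
  intro raw _
  unfold Spec_strip_jsonc_comments_py strip_jsonc_comments_py strip_jsonc_comments_py_alt
  rw [funext stripLineB_eq]
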